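-- pv_equiv track=rewrite | github.com/JosephMaltese/Tic-Tac-Toe-AI | tictactoeMike.py | player
-- ===== SOURCE A (Python) =====
-- X = "X"
--
-- O = "O"
--
-- def player(board):
--     """
--     Returns player who has the next turn on a board.
--     """
--     xCounter = 0
--     oCounter = 0
--
--     xCounter = sum(row.count(X) for row in board)
--     oCounter = sum(row.count(O) for row in board)
--
--     if xCounter <= oCounter:
--         return X
--     else:
--         return O
-- ===== SOURCE B (Python) =====
-- X = "X"
-- O = "O"
--
-- def player(board):
--     """
--     Returns player who has the next turn on a board.
--     """
--     # Pair-cancellation: each X annihilates an O and vice versa on a stack;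
--     # whatever mark survives has the surplus. X moves next unless X has a surplus.
--     stack = []
--     for row in board:
--         for cell in row:
--             if cell == X or cell == O:
--                 if stack and stack[-1] != cell:
--                     stack.pop()
--                 else:
--                     stack.append(cell)
--     if stack and stack[-1] == X:
--         return O
--     return X
-- ===== Notes on version B (the rewrite author's own statement) =====
-- stated objective: alternative
-- what changed: Replaces counting entirely by Boyer-Moore-style pair cancellation: marks are pushed on a stack and opposite marks annihilate each other; the surviving mark (if any) decides the turn, so no counts are ever computed.
import Mathlib
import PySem

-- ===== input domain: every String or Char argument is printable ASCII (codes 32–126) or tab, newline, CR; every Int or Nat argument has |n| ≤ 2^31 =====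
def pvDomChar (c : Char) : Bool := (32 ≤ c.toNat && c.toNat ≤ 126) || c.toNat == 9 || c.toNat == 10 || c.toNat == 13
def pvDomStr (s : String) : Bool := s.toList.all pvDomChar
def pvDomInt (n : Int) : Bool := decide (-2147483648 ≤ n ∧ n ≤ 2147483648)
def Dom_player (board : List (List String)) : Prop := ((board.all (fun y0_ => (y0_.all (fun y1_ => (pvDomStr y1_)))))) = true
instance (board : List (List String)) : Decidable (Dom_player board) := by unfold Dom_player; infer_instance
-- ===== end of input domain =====

-- B replaces A's counting by pair cancellation on a stack (opposite marks annihilate); alternative algorithm, same cost.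

-- ===== PORT A =====
def player (board : List (List String)) : String :=
  let xCounter : Int := (board.map (fun row => (PySem.List.count row "X" : Int))).foldl (· + ·) 0
  let oCounter : Int := (board.map (fun row => (PySem.List.count row "O" : Int))).foldl (· + ·) 0
  if xCounter ≤ oCounter then "X" else "O"

-- ===== PORT B =====
-- one step of Source B's inner loop: cancel against the top of the stack or push
def pvStep (stack : List String) (cell : String) : List String :=
  if cell = "X" ∨ cell = "O" then
    if stack ≠ [] ∧ stack.getLast? ≠ some cell then stack.dropLast
    else stack ++ [cell]
  else stack

def player_alt (board : List (List String)) : String :=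
  let stack := board.foldl (fun st row => row.foldl pvStep st) []
  if stack ≠ [] ∧ stack.getLast? = some "X" then "O" else "X"

-- ===== PRECONDITION & SPEC =====
def Spec_player (board : List (List String)) (out : String) : Prop := out = player_alt board
instance (board : List (List String)) (out : String) : Decidable (Spec_player board out) := by unfold Spec_player; infer_instance

-- ===== CLAIM (what is proved, stated in full; the proofs are below) =====
def Claim_equal_player : Prop := ∀ (board : List (List String)), Dom_player board → Spec_player board (player board)

-- ===== LEMMAS AND PROOFS =====

-- canonical shape of the stack: a homogeneous run encoding the signed X-surplus d
def pvRepr (d : Int) : List String :=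
  if 0 ≤ d then List.replicate d.toNat "X" else List.replicate (-d).toNat "O"

theorem getLast?_replicate_succ (n : Nat) (a : String) :
    (List.replicate (n + 1) a).getLast? = some a := by
  rw [List.replicate_succ', List.getLast?_concat]

theorem pvStep_repr (d : Int) (cell : String) :
    pvStep (pvRepr d) cell
      = pvRepr (d + (if cell = "X" then 1 else if cell = "O" then -1 else 0)) := by
  unfold pvStep pvRepr
  by_cases hx : cell = "X"
  · subst hx
    rcases lt_trichotomy d 0 with hd | hd | hd
    · have h1 : ¬ (0 : Int) ≤ d := by omega
      have hn : (-d).toNat = ((-d).toNat - 1) + 1 := by omega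
      simp only [if_neg h1, true_or, if_pos]
      rw [hn, List.replicate_succ', List.getLast?_concat, List.dropLast_concat]
      rw [if_pos ⟨by simp, by simp⟩]
      by_cases h2 : (0:Int) ≤ d + 1
      · have : d = -1 := by omega
        subst this; simp
      · rw [if_neg h2]
        congr 1
        omega
    · subst hd; simp
    · have h1 : (0 : Int) ≤ d := by omega
      have hn : d.toNat = (d.toNat - 1) + 1 := by omega
      simp only [if_pos h1, true_or, if_pos]
      rw [hn, getLast?_replicate_succ]
      have hcond : ¬ (List.replicate ((d.toNat - 1) + 1) "X" ≠ [] ∧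
          (some "X" : Option String) ≠ some "X") := by simp
      rw [if_neg hcond, ← List.replicate_succ', if_pos (by omega : (0:Int) ≤ d + 1)]
      congr 1
      omega
  · by_cases ho : cell = "O"
    · subst ho
      simp only [if_neg hx]
      rcases lt_trichotomy d 0 with hd | hd | hd
      · have h1 : ¬ (0 : Int) ≤ d := by omega
        have hn : (-d).toNat = ((-d).toNat - 1) + 1 := by omega
        simp only [if_neg h1, or_true, if_pos]
        rw [hn, getLast?_replicate_succ]
        have hcond : ¬ (List.replicate (((-d).toNat - 1) + 1) "O" ≠ [] ∧
            (some "O" : Option String) ≠ some "O") := by simp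
        rw [if_neg hcond, ← List.replicate_succ', if_neg (by omega : ¬ (0:Int) ≤ d + -1)]
        congr 1
        omega
      · subst hd; simp
      · have h1 : (0 : Int) ≤ d := by omega
        have hn : d.toNat = (d.toNat - 1) + 1 := by omega
        simp only [if_pos h1, or_true, if_pos]
        rw [hn, List.replicate_succ', List.getLast?_concat, List.dropLast_concat]
        rw [if_pos ⟨by simp, by simp⟩]
        by_cases h2 : (0:Int) ≤ d + -1
        · rw [if_pos h2]; congr 1; omega
        · have : d = 1 := by omega
          subst this; simp
    · simp [hx, ho]

-- the balance contributed by one row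
def pvRowBal (row : List String) : Int :=
  (PySem.List.count row "X" : Int) - (PySem.List.count row "O" : Int)

theorem row_repr (row : List String) (d : Int) :
    row.foldl pvStep (pvRepr d) = pvRepr (d + pvRowBal row) := by
  induction row generalizing d with
  | nil => simp [pvRowBal, PySem.List.count]
  | cons c t ih =>
    simp only [List.foldl, pvStep_repr, ih, pvRowBal, PySem.List.count, List.count_cons]
    congr 1
    by_cases hx : c = "X" <;> by_cases ho : c = "O" <;>
      simp_all <;> omega

theorem board_repr (board : List (List String)) (d : Int) :
    board.foldl (fun st row => row.foldl pvStep st) (pvRepr d)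
      = pvRepr (d + (board.map pvRowBal).foldl (· + ·) 0) := by
  induction board generalizing d with
  | nil => simp
  | cons r t ih =>
    simp only [List.foldl, List.map, row_repr, ih]
    congr 1
    have : ∀ (l : List Int) (a : Int), l.foldl (· + ·) a = a + l.foldl (· + ·) 0 := by
      intro l
      induction l with
      | nil => simp
      | cons x s ihs => intro a; simp only [List.foldl]; rw [ihs, ihs (0 + x)]; ring
    rw [this (t.map pvRowBal) (0 + pvRowBal r)]
    ring

theorem foldl_add_split (f g : List String → Int) (t : List (List String)) :
    (t.map (fun row => f row - g row)).foldl (· + ·) 0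
      = (t.map f).foldl (· + ·) 0 - (t.map g).foldl (· + ·) 0 := by
  induction t with
  | nil => simp
  | cons r s ih =>
    have key : ∀ (l : List Int) (a : Int), l.foldl (· + ·) a = a + l.foldl (· + ·) 0 := by
      intro l
      induction l with
      | nil => simp
      | cons x u ihs => intro a; simp only [List.foldl]; rw [ihs, ihs (0 + x)]; ring
    simp only [List.map, List.foldl]
    rw [key, key ((s.map f)) (0 + f r), key ((s.map g)) (0 + g r), ih]
    ring

-- ===== VERDICT (by name: the statement is the Claim_ definition above) =====
theorem player_spec : Claim_equal_player := by
  intro board _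
  unfold Spec_player player player_alt
  simp only []
  have h0 : (List.foldl (fun st row => row.foldl pvStep st) [] board)
      = pvRepr ((board.map pvRowBal).foldl (· + ·) 0) := by
    have := board_repr board 0
    simpa [pvRepr] using this
  rw [h0]
  have hsplit := foldl_add_split (fun row => (PySem.List.count row "X" : Int))
      (fun row => (PySem.List.count row "O" : Int)) board
  set x : Int := (board.map (fun row => (PySem.List.count row "X" : Int))).foldl (· + ·) 0 with hx
  set o : Int := (board.map (fun row => (PySem.List.count row "O" : Int))).foldl (· + ·) 0 with ho
  have hbal : (board.map pvRowBal).foldl (· + ·) 0 = x - o := by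
    unfold pvRowBal; rw [hsplit]
  rw [hbal]
  unfold pvRepr
  by_cases h : x ≤ o
  · rw [if_pos h]
    have hd : ¬ (if 0 ≤ x - o then List.replicate (x - o).toNat "X"
        else List.replicate (-(x - o)).toNat "O" : List String) ≠ [] ∨
        ¬ (if 0 ≤ x - o then List.replicate (x - o).toNat "X"
        else List.replicate (-(x - o)).toNat "O" : List String).getLast? = some "X" := by
      by_cases h2 : (0:Int) ≤ x - o
      · left
        have : x - o = 0 := by omega
        simp [this]
      · right
        have hn : (-(x - o)).toNat = ((-(x - o)).toNat - 1) + 1 := by omega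
        rw [if_neg h2, hn, getLast?_replicate_succ]
        simp
    rcases hd with hd | hd
    · rw [if_neg (fun hc => hd hc.1)]
    · rw [if_neg (fun hc => hd hc.2)]
  · rw [if_neg h]
    have h2 : (0:Int) ≤ x - o := by omega
    have hn : (x - o).toNat = ((x - o).toNat - 1) + 1 := by omega
    rw [if_pos h2, hn, getLast?_replicate_succ]
    rw [if_pos ⟨by simp, rfl⟩]
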